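-- pv_equiv track=rewrite | github.com/Grey2k/yandex.praktikum-alghoritms | tasks/sprint-8/M - Prefix Function/prefix_function.py | find
-- ===== SOURCE A (Python) =====
-- def find(search: list, pattern: list, start: int) -> int:
--     result = -1
--
--     if start >= len(search):
--         return result
--
--     if len(search) - start < len(pattern):
--         return result
--
--     for pos in range(start, len(search) - len(pattern) + 1):
--         shift = None
--         match = True
--
--         for offset in range(len(pattern)):
--             if shift is None:
--                 shift = pattern[offset] - search[pos]
--
--             if search[pos + offset] + shift != pattern[offset]:
--                 match = False
--                 break
--
--         if match:
--             result = pos + 1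
--             break
--
--     return result
-- ===== SOURCE B (Python) =====
-- def find(search: list, pattern: list, start: int) -> int:
--     n, m = len(search), len(pattern)
--     if start >= n or n - start < m:
--         return -1
--     if m <= 1:
--         return start + 1
--     dp = [pattern[k + 1] - pattern[k] for k in range(m - 1)]
--     ds = [search[k + 1] - search[k] for k in range(n - 1)]
--     for pos in range(start, n - m + 1):
--         if ds[pos:pos + m - 1] == dp:
--             return pos + 1
--     return -1
-- ===== Notes on version B (the rewrite author's own statement) =====
-- stated objective: alternative
-- what changed: B reduces shift-invariant window matching to exact matching of the pattern's first-difference sequence inside the search's first-difference sequence (both built once), replacing A's per-window shift/None/match bookkeeping with a scan comparing precomputed difference windows.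
-- outside the precondition, e.g. on find([5, 9], [9, 5], -1): A returns 0, B returns -1; on find([1], [1, 1], -5): A raises IndexError, B returns -1
import Mathlib
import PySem

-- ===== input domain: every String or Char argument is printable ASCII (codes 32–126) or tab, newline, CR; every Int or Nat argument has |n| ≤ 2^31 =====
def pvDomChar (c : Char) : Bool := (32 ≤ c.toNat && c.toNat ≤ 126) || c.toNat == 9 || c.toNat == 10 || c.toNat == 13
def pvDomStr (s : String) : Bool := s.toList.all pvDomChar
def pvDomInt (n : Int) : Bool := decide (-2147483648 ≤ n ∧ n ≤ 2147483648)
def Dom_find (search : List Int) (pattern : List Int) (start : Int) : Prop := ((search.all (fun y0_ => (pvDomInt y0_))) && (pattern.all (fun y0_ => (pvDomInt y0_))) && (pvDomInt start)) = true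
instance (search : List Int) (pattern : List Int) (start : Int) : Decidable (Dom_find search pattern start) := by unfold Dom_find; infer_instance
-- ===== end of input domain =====

-- B replaces A's per-window shift bookkeeping by exact matching of first-difference
-- sequences (objective: alternative).  A and B agree on all inputs with 0 ≤ start.

-- ===== PORT A =====
-- inner 'for offset in range(len(pattern))' loop with its shift/None state and break;
-- indices are in range whenever Pre_find holds, so pyGetD's default is never used there.
def findInnerA (search pattern : List Int) (pos : Int) : List Int → Option Int → Bool
  | [], _ => true
  | off :: rest, shift =>
    let shift : Option Int :=
      match shift with
      | none => some (PySem.List.pyGetD pattern off 0 - PySem.List.pyGetD search pos 0)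
      | some s => some s
    if PySem.List.pyGetD search (pos + off) 0 + shift.getD 0 ≠ PySem.List.pyGetD pattern off 0 then
      false
    else
      findInnerA search pattern pos rest shift

-- outer 'for pos in range(start, len(search)-len(pattern)+1)' loop with its break
def findOuterA (search pattern : List Int) : List Int → Int
  | [] => -1
  | pos :: rest =>
    if findInnerA search pattern pos (PySem.List.pyRange 0 (pattern.length : Int) 1) none then
      pos + 1
    else
      findOuterA search pattern rest

def find (search : List Int) (pattern : List Int) (start : Int) : Int :=
  if start ≥ (search.length : Int) then -1
  else if (search.length : Int) - start < (pattern.length : Int) then -1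
  else findOuterA search pattern
        (PySem.List.pyRange start ((search.length : Int) - (pattern.length : Int) + 1) 1)

-- ===== PORT B =====
-- 'for pos in range(start, n-m+1): if ds[pos:pos+m-1] == dp: return pos+1' loop
def altScan (dp ds : List Int) (m : Int) : List Int → Int
  | [] => -1
  | pos :: rest =>
    if PySem.List.slice ds (some pos) (some (pos + m - 1)) = dp then pos + 1
    else altScan dp ds m rest

def find_alt (search : List Int) (pattern : List Int) (start : Int) : Int :=
  let n : Int := search.length
  let m : Int := pattern.length
  if start ≥ n ∨ n - start < m then -1
  else if m ≤ 1 then start + 1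
  else
    -- the two difference-list comprehensions; all indices in range since m ≥ 2, n ≥ 2 here
    let dp := (PySem.List.pyRange 0 (m - 1) 1).map
                (fun k => PySem.List.pyGetD pattern (k + 1) 0 - PySem.List.pyGetD pattern k 0)
    let ds := (PySem.List.pyRange 0 (n - 1) 1).map
                (fun k => PySem.List.pyGetD search (k + 1) 0 - PySem.List.pyGetD search k 0)
    altScan dp ds m (PySem.List.pyRange start (n - m + 1) 1)

-- ===== PRECONDITION & SPEC =====
-- Pre_find restricts to the natural domain 0 ≤ start: on negative start A either raises
-- IndexError or returns positions produced by Python's negative-index wraparound.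
def Pre_find (search : List Int) (pattern : List Int) (start : Int) : Prop := 0 ≤ start
instance (search : List Int) (pattern : List Int) (start : Int) : Decidable (Pre_find search pattern start) := by unfold Pre_find; infer_instance
def pvWitness_find : List Int × List Int × Int := ([3, 5, 4, 6, 5], [9, 8, 10], 1)

def Spec_find (search : List Int) (pattern : List Int) (start : Int) (out : Int) : Prop := out = find_alt search pattern start
instance (search : List Int) (pattern : List Int) (start : Int) (out : Int) : Decidable (Spec_find search pattern start out) := by unfold Spec_find; infer_instance

-- ===== CLAIM (what is proved, stated in full; the proofs are below) =====
def Claim_equal_find : Prop := ∀ (search : List Int) (pattern : List Int) (start : Int), Dom_find search pattern start → Pre_find search pattern start → Spec_find search pattern start (find search pattern start)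

-- ===== LEMMAS AND PROOFS =====

-- A's inner loop with shift already set is an 'all' over the remaining offsets
theorem innerA_some (search pattern : List Int) (pos c : Int) (l : List Int) :
    findInnerA search pattern pos l (some c) =
      l.all (fun off => decide (PySem.List.pyGetD search (pos + off) 0 + c = PySem.List.pyGetD pattern off 0)) := by
  induction l with
  | nil => simp [findInnerA]
  | cons off rest ih =>
    by_cases h : PySem.List.pyGetD search (pos + off) 0 + c = PySem.List.pyGetD pattern off 0
    · simp [findInnerA, h, ih]
    · simp [findInnerA, h]

-- characterisation of A's whole inner loop (nonempty pattern): window matches up to the shift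
theorem innerA_none_true_iff (search pattern : List Int) (pos M : Int) (hM : 1 ≤ M) :
    (findInnerA search pattern pos (PySem.List.pyRange 0 M 1) none = true) ↔
      (∀ off : Int, 0 ≤ off → off < M →
        PySem.List.pyGetD search (pos + off) 0 +
          (PySem.List.pyGetD pattern 0 0 - PySem.List.pyGetD search pos 0) =
          PySem.List.pyGetD pattern off 0) := by
  rw [PySem.List.pyRange_one_cons (by omega : (0:Int) < M)]
  show (findInnerA search pattern pos (0 :: PySem.List.pyRange (0+1) M 1) none = true) ↔ _
  unfold findInnerA
  have h0 : ¬ (PySem.List.pyGetD search (pos + 0) 0 +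
      (some (PySem.List.pyGetD pattern 0 0 - PySem.List.pyGetD search pos 0)).getD 0 ≠
      PySem.List.pyGetD pattern 0 0) := by
    simp
  rw [if_neg h0, innerA_some]
  rw [List.all_eq_true]
  constructor
  · intro h off h0off hoffM
    rcases eq_or_lt_of_le h0off with h' | h'
    · subst h'; simp
    · have := h off (by rw [PySem.List.mem_pyRange_one]; omega)
      simpa using this
  · intro h off hmem
    rw [PySem.List.mem_pyRange_one] at hmem
    have := h off (by omega) (by omega)
    simpa using this

-- telescoping: matching up to a constant shift ↔ first differences agree
theorem tele (f g : Int → Int) (m : Int) :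
    (∀ off : Int, 0 ≤ off → off < m → f off + (g 0 - f 0) = g off) ↔
      (∀ k : Int, 0 ≤ k → k < m - 1 → f (k + 1) - f k = g (k + 1) - g k) := by
  constructor
  · intro h k hk0 hk1
    have h1 := h k hk0 (by omega)
    have h2 := h (k + 1) (by omega) (by omega)
    linarith
  · intro h
    have key : ∀ j : Nat, (j : Int) < m → f j - f 0 = g j - g 0 := by
      intro j
      induction j with
      | zero => intro _; simp
      | succ j ih =>
        intro hj
        have hj' : (j : Int) < m := by push_cast at hj ⊢; omega
        have h1 := ih hj'
        have h2 := h j (by positivity) (by push_cast at hj ⊢; omega)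
        push_cast
        push_cast at h1 h2
        linarith
    intro off h0 hm
    have : off = ((off.toNat : Nat) : Int) := by omega
    rw [this] at hm ⊢
    have := key off.toNat hm
    linarith

-- B's slice comparison spelt out pointwise
theorem sliceB_iff (search pattern : List Int) (pos : Int)
    (hm : 2 ≤ (pattern.length : Int)) (hpos : 0 ≤ pos)
    (hwin : pos + (pattern.length : Int) ≤ (search.length : Int)) :
    (PySem.List.slice ((PySem.List.pyRange 0 ((search.length:Int) - 1) 1).map
        (fun k => PySem.List.pyGetD search (k+1) 0 - PySem.List.pyGetD search k 0))
      (some pos) (some (pos + (pattern.length:Int) - 1)) =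
      (PySem.List.pyRange 0 ((pattern.length:Int) - 1) 1).map
        (fun k => PySem.List.pyGetD pattern (k+1) 0 - PySem.List.pyGetD pattern k 0))
    ↔ (∀ k : Int, 0 ≤ k → k < (pattern.length:Int) - 1 →
        PySem.List.pyGetD search (pos+k+1) 0 - PySem.List.pyGetD search (pos+k) 0 =
        PySem.List.pyGetD pattern (k+1) 0 - PySem.List.pyGetD pattern k 0) := by
  set n := search.length with hn
  set m := pattern.length with hmdef
  set ds := (PySem.List.pyRange 0 ((n:Int) - 1) 1).map
      (fun k => PySem.List.pyGetD search (k+1) 0 - PySem.List.pyGetD search k 0) with hds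
  set dp := (PySem.List.pyRange 0 ((m:Int) - 1) 1).map
      (fun k => PySem.List.pyGetD pattern (k+1) 0 - PySem.List.pyGetD pattern k 0) with hdp
  have hds_len : ds.length = n - 1 := by
    rw [hds]; simp [PySem.List.length_pyRange_one]
  have hdp_len : dp.length = m - 1 := by
    rw [hdp]; simp [PySem.List.length_pyRange_one]
  have hslice : PySem.List.slice ds (some pos) (some (pos + (m:Int) - 1)) =
      (ds.drop pos.toNat).take (m - 1) := by
    rw [PySem.List.slice_toNat _ hpos (by omega : (0:Int) ≤ pos + (m:Int) - 1)]
    congr 1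
    omega
  rw [hslice]
  have hlen_take : ((ds.drop pos.toNat).take (m - 1)).length = m - 1 := by
    simp [hds_len]; omega
  have hdsget : ∀ (i : Nat) (h : i < ds.length), ds[i] =
      PySem.List.pyGetD search ((i:Int)+1) 0 - PySem.List.pyGetD search (i:Int) 0 := by
    intro i h
    simp [hds, PySem.List.getElem_pyRange_one]
  have hdpget : ∀ (i : Nat) (h : i < dp.length), dp[i] =
      PySem.List.pyGetD pattern ((i:Int)+1) 0 - PySem.List.pyGetD pattern (i:Int) 0 := by
    intro i h
    simp [hdp, PySem.List.getElem_pyRange_one]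
  constructor
  · intro h k hk0 hk1
    have hk : k.toNat < m - 1 := by omega
    have hgk0 : ((ds.drop pos.toNat).take (m-1))[k.toNat]? = dp[k.toNat]? := by rw [h]
    rw [List.getElem?_eq_getElem (by omega), List.getElem?_eq_getElem (by omega)] at hgk0
    have hgk := Option.some.inj hgk0
    rw [List.getElem_take, List.getElem_drop] at hgk
    rw [hdsget _ (by omega), hdpget _ (by omega)] at hgk
    have e1 : ((pos.toNat + k.toNat : Nat) : Int) = pos + k := by omega
    rw [e1] at hgk
    convert hgk using 3 <;> omega
  · intro h
    apply List.ext_getElem (by omega)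
    intro i hi1 hi2
    rw [List.getElem_take, List.getElem_drop]
    rw [hdsget _ (by omega), hdpget _ (by omega)]
    have := h i (by positivity) (by omega)
    have e1 : ((pos.toNat + i : Nat) : Int) = pos + i := by omega
    rw [e1]
    convert this using 3 <;> omega

-- telescoping specialised to the two window conditions
theorem teleWin (search pattern : List Int) (pos m : Int) :
    (∀ off : Int, 0 ≤ off → off < m →
        PySem.List.pyGetD search (pos + off) 0 +
          (PySem.List.pyGetD pattern 0 0 - PySem.List.pyGetD search pos 0) =
          PySem.List.pyGetD pattern off 0) ↔
      (∀ k : Int, 0 ≤ k → k < m - 1 →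
        PySem.List.pyGetD search (pos+k+1) 0 - PySem.List.pyGetD search (pos+k) 0 =
        PySem.List.pyGetD pattern (k+1) 0 - PySem.List.pyGetD pattern k 0) := by
  have h := tele (fun off => PySem.List.pyGetD search (pos + off) 0)
      (fun off => PySem.List.pyGetD pattern off 0) m
  simpa [← add_assoc] using h

-- the two outer scans agree stepwise once the window conditions agree
theorem scanEq (search pattern dp ds : List Int) (L : List Int)
    (h : ∀ pos ∈ L,
      (findInnerA search pattern pos (PySem.List.pyRange 0 (pattern.length:Int) 1) none = true) ↔
        (PySem.List.slice ds (some pos) (some (pos + (pattern.length:Int) - 1)) = dp)) :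
    findOuterA search pattern L = altScan dp ds (pattern.length:Int) L := by
  induction L with
  | nil => simp [findOuterA, altScan]
  | cons pos rest ih =>
    unfold findOuterA altScan
    by_cases hc : PySem.List.slice ds (some pos) (some (pos + (pattern.length:Int) - 1)) = dp
    · rw [if_pos ((h pos (by simp)).2 hc), if_pos hc]
    · have hni : ¬ (findInnerA search pattern pos (PySem.List.pyRange 0 (pattern.length:Int) 1) none = true) :=
        fun hh => hc ((h pos (by simp)).1 hh)
      rw [if_neg hni, if_neg hc]
      exact ih (fun q hq => h q (List.mem_cons_of_mem _ hq))

-- ===== VERDICT (by name: the statement is the Claim_ definition above) =====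
theorem find_spec : Claim_equal_find := by
  intro search pattern start _hDom hPre
  unfold Pre_find at hPre
  unfold Spec_find
  simp only [find, find_alt]
  by_cases h1 : start ≥ ((search.length : Nat) : Int)
  · rw [if_pos h1, if_pos (Or.inl h1)]
  · rw [if_neg h1]
    by_cases h2 : ((search.length : Nat) : Int) - start < ((pattern.length : Nat) : Int)
    · rw [if_pos h2, if_pos (Or.inr h2)]
    · rw [if_neg h2, if_neg (fun h => h.elim h1 h2)]
      by_cases h3 : ((pattern.length : Nat) : Int) ≤ 1
      · -- guards passed, len(pattern) ≤ 1: A's loop stops at its first position pos = start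
        rw [if_pos h3]
        rw [PySem.List.pyRange_one_cons
          (by omega : start < ((search.length : Nat) : Int) - ((pattern.length : Nat) : Int) + 1)]
        unfold findOuterA
        have hinner : findInnerA search pattern start
            (PySem.List.pyRange 0 ((pattern.length : Nat) : Int) 1) none = true := by
          have hm0 : ((pattern.length : Nat) : Int) = 0 ∨ ((pattern.length : Nat) : Int) = 1 := by omega
          rcases hm0 with h | h
          · rw [h, PySem.List.pyRange_one_eq_nil (le_refl 0)]
            rfl
          · rw [h]
            have hr : PySem.List.pyRange (0:Int) 1 1 = [0] := by
              simpa using PySem.List.pyRange_one_singleton (0:Int)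
            rw [hr]
            unfold findInnerA
            rw [if_neg (by simp)]
            rfl
        rw [if_pos hinner]
      · -- guards passed, len(pattern) ≥ 2: both loops scan the same range with equal window tests
        rw [if_neg h3]
        apply scanEq
        intro pos hmem
        rw [PySem.List.mem_pyRange_one] at hmem
        rw [innerA_none_true_iff search pattern pos ((pattern.length : Nat) : Int) (by omega)]
        rw [sliceB_iff search pattern pos (by omega) (by omega) (by omega)]
        exact teleWin search pattern pos ((pattern.length : Nat) : Int)
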